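-- pv_equiv track=rewrite | github.com/dtbinh/15-112 | hw5.py | isGoodSquare
-- ===== SOURCE A (Python) =====
-- def isGoodSquare(a): #n*n, no-empty, different integers
--     rows = len(a)
--     if rows == 0: return False
--     for row in range(rows):
--     #check if it is a 2d-list which length of each row is the same
--         if type(a[row]) != list or len(a[0]) != len(a[row]):
--             return False
--     cols = len(a[0])
--     if cols != rows: return False    #check if it is a square
--     numList = []
--     for i in range(rows):            #check no integer occurs more than once
--         for j in range(rows):
--             if type(a[i][j]) != int: return False #check all are integers
--             numList += [a[i][j]]
--     for j in numList:
--         if numList.count(j) != 1: return False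
--     return True
-- ===== SOURCE B (Python) =====
-- def isGoodSquare(a):
--     n = len(a)
--     if n == 0:
--         return False
--     for row in a:
--         if type(row) != list or len(row) != len(a[0]):
--             return False
--     if len(a[0]) != n:
--         return False
--     flat = [x for row in a for x in row]
--     if any(type(x) != int for x in flat):
--         return False
--     s = sorted(flat)
--     return all(x != y for x, y in zip(s, s[1:]))
-- ===== Notes on version B (the rewrite author's own statement) =====
-- stated objective: alternative
-- what changed: Replaces A's per-element count scan over the flattened n^2 elements with a sort followed by one adjacent-pair comparison pass, and writes the validation preamble by direct iteration over rows instead of index loops.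
import Mathlib
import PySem

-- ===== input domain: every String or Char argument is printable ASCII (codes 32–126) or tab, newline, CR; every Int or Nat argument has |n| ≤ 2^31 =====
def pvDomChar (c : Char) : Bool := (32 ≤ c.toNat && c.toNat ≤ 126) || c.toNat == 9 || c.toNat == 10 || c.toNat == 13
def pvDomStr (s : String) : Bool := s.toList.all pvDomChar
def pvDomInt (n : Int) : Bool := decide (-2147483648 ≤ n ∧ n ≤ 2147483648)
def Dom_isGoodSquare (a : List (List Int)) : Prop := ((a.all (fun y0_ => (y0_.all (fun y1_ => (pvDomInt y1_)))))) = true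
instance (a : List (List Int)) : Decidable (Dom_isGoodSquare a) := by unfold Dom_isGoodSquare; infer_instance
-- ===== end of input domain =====

-- B detects duplicates by sorting the flattened square and scanning adjacent pairs, instead of A's per-element count scan.
-- Python's runtime type checks (type(a[row]) != list, type(a[i][j]) != int) always pass under the
-- List (List Int) type convention, so both ports omit them.

-- ===== PORT A =====
def isGoodSquare (a : List (List Int)) : Bool :=
  -- rows = len(a); cols = len(a[0]); numList is the nested index-loop accumulation
  -- (a[i][j] never raises because every row length = cols = rows)
  if a.length = 0 then false
  else if (List.range a.length).any (fun row => decide (¬ (a.getD 0 []).length = (a.getD row []).length)) then false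
  else if ¬ (a.getD 0 []).length = a.length then false
  else if ((List.range a.length).foldl (fun acc i =>
        (List.range a.length).foldl (fun acc2 j => acc2 ++ [(a.getD i []).getD j 0]) acc) []).any
      (fun j => decide (¬ ((List.range a.length).foldl (fun acc i =>
        (List.range a.length).foldl (fun acc2 j => acc2 ++ [(a.getD i []).getD j 0]) acc) []).count j = 1)) then false
  else true

-- ===== PORT B =====
def isGoodSquare_alt (a : List (List Int)) : Bool :=
  -- n = len(a); flat = [x for row in a for x in row]; s = sorted(flat)
  if a.length = 0 then false
  else if a.any (fun row => decide (¬ row.length = (a.headD []).length)) then false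
  else if ¬ (a.headD []).length = a.length then false
  else ((PySem.List.sorted a.flatten (fun x => x) false).zip
      ((PySem.List.sorted a.flatten (fun x => x) false).drop 1)).all
    (fun p => decide (¬ p.1 = p.2))  -- all(x != y for x, y in zip(s, s[1:]))

-- ===== PRECONDITION & SPEC =====
def Spec_isGoodSquare (a : List (List Int)) (out : Bool) : Prop := out = isGoodSquare_alt a
instance (a : List (List Int)) (out : Bool) : Decidable (Spec_isGoodSquare a out) := by unfold Spec_isGoodSquare; infer_instance

-- ===== CLAIM (what is proved, stated in full; the proofs are below) =====
def Claim_equal_isGoodSquare : Prop := ∀ (a : List (List Int)), Dom_isGoodSquare a → Spec_isGoodSquare a (isGoodSquare a)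

-- ===== LEMMAS AND PROOFS =====

/-- Folding over `range l.length` through `getD` is folding over the list itself. -/
theorem foldl_range_getD {α β : Type} (l : List α) (d : α) (f : β → α → β) (acc : β) :
    (List.range l.length).foldl (fun b j => f b (l.getD j d)) acc = l.foldl f acc := by
  induction l generalizing acc with
  | nil => simp
  | cons x t ih =>
    rw [List.length_cons, List.range_succ_eq_map, List.foldl_cons, List.foldl_map]
    simpa using ih (f acc x)

/-- Pushing singleton appends is `acc ++ l`. -/
theorem foldl_append_singleton {α : Type} (l : List α) (acc : List α) :
    l.foldl (fun acc2 x => acc2 ++ [x]) acc = acc ++ l := by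
  induction l generalizing acc with
  | nil => simp
  | cons x t ih => simp [ih]

/-- A's row-length check over index range agrees with B's check over the rows. -/
theorem any_range_len (a : List (List Int)) :
    ((List.range a.length).any fun row => decide (¬ (a.getD 0 []).length = (a.getD row []).length))
      = (a.any fun row => decide (¬ row.length = (a.getD 0 []).length)) := by
  apply Bool.eq_iff_iff.mpr
  simp only [List.any_eq_true, List.mem_range, decide_eq_true_eq]
  constructor
  · rintro ⟨i, hi, hp⟩
    refine ⟨a.getD i [], ?_, fun e => hp e.symm⟩
    rw [List.getD_eq_getElem a [] hi]; exact a.getElem_mem hi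
  · rintro ⟨x, hx, hp⟩
    obtain ⟨i, hi, rfl⟩ := List.getElem_of_mem hx
    exact ⟨i, hi, fun e => hp (by rw [List.getD_eq_getElem a [] hi] at e; exact e.symm)⟩

/-- A's nested index loops build exactly the row-major flattening, given all rows have length m. -/
theorem numList_gen (a : List (List Int)) (m : Nat) (hlen : ∀ row ∈ a, row.length = m)
    (acc : List Int) :
    (List.range a.length).foldl (fun acc i =>
        (List.range m).foldl (fun acc2 j => acc2 ++ [(a.getD i []).getD j 0]) acc) acc
      = acc ++ a.flatten := by
  induction a generalizing acc with
  | nil => simp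
  | cons r t ih =>
    rw [List.length_cons, List.range_succ_eq_map, List.foldl_cons, List.foldl_map]
    have h0 : (List.range m).foldl (fun acc2 j => acc2 ++ [((r :: t).getD 0 []).getD j 0]) acc
        = acc ++ r := by
      simp only [List.getD_cons_zero]
      rw [← hlen r (by simp)]
      exact (foldl_range_getD r 0 (fun acc2 x => acc2 ++ [x]) acc).trans
        (foldl_append_singleton r acc)
    rw [h0]
    have := ih (fun row hm => hlen row (by simp [hm])) (acc ++ r)
    simpa using this

/-- adjacent-pair `all` ↔ chain of ≠. -/
theorem zip_tail_all_ne (s : List Int) :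
    ((s.zip (s.drop 1)).all (fun p => decide (¬ p.1 = p.2)) = true) ↔ List.IsChain (· ≠ ·) s := by
  induction s with
  | nil => simp
  | cons x t ih =>
    cases t with
    | nil => simp
    | cons y u =>
      rw [List.isChain_cons_cons, ← ih]
      simp [List.zip]

/-- On a ≤-sorted chain of distinct neighbours, neighbours strictly increase. -/
theorem chain_lt_of_chain_ne (s : List Int) :
    s.Pairwise (· ≤ ·) → List.IsChain (· ≠ ·) s → List.IsChain (· < ·) s := by
  induction s with
  | nil => intro _ _; exact List.isChain_nil
  | cons x t ih =>
    cases t with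
    | nil => intro _ _; exact List.isChain_singleton x
    | cons y u =>
      intro h hc
      rw [List.isChain_cons_cons] at hc ⊢
      rw [List.pairwise_cons] at h
      exact ⟨lt_of_le_of_ne (h.1 y (by simp)) hc.1, ih h.2 hc.2⟩

/-- On a ≤-sorted list, no equal neighbours ↔ no duplicates at all. -/
theorem chain_ne_iff_nodup (s : List Int) (h : s.Pairwise (· ≤ ·)) :
    List.IsChain (· ≠ ·) s ↔ s.Nodup := by
  constructor
  · intro hc
    exact (List.isChain_iff_pairwise.mp (chain_lt_of_chain_ne s h hc)).imp ne_of_lt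
  · intro hn
    exact hn.isChain

/-- The two duplicate tests agree on any list. -/
theorem dup_check_eq (fl : List Int) :
    (if fl.any (fun j => decide (¬ fl.count j = 1)) = true then false else true)
      = (((PySem.List.sorted fl (fun x => x) false).zip
            ((PySem.List.sorted fl (fun x => x) false).drop 1)).all
          (fun p => decide (¬ p.1 = p.2))) := by
  set s := PySem.List.sorted fl (fun x => x) false with hs
  have hperm : s.Perm fl := PySem.List.sorted_perm fl (fun x => x) false
  have hpair : s.Pairwise (· ≤ ·) := by
    have := PySem.List.sorted_pairwise (xs := fl) (key := fun x => x)
    simpa [← hs] using this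
  have hnodup : fl.Nodup ↔ s.Nodup := ⟨fun h => hperm.symm.nodup h, fun h => hperm.nodup h⟩
  by_cases hdup : fl.Nodup
  · have hall : ((s.zip (s.drop 1)).all (fun p => decide (¬ p.1 = p.2))) = true :=
      (zip_tail_all_ne s).mpr ((chain_ne_iff_nodup s hpair).mpr (hnodup.mp hdup))
    have hcond : ¬ ((fl.any (fun j => decide (¬ fl.count j = 1))) = true) := by
      simp only [List.any_eq_true, decide_eq_true_eq]
      push Not
      intro x hx
      exact List.nodup_iff_count_eq_one.mp hdup x hx
    rw [hall, if_neg hcond]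
  · have hcond : ((fl.any (fun j => decide (¬ fl.count j = 1))) = true) := by
      simp only [List.any_eq_true, decide_eq_true_eq]
      rw [List.nodup_iff_count_eq_one] at hdup
      push Not at hdup
      obtain ⟨x, hx, hc⟩ := hdup
      exact ⟨x, hx, hc⟩
    rw [if_pos hcond]
    symm
    rw [Bool.eq_false_iff]
    intro hb
    exact hdup (hnodup.mpr ((chain_ne_iff_nodup s hpair).mp ((zip_tail_all_ne s).mp hb)))

theorem isGoodSquare_eq_alt (a : List (List Int)) : isGoodSquare a = isGoodSquare_alt a := by
  unfold isGoodSquare isGoodSquare_alt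
  have hhead : a.headD [] = a.getD 0 [] := by cases a <;> rfl
  rw [hhead, any_range_len a]
  by_cases h0 : a.length = 0
  · rw [if_pos h0, if_pos h0]
  · rw [if_neg h0, if_neg h0]
    by_cases hrows : (a.any fun row => decide (¬ row.length = (a.getD 0 []).length)) = true
    · rw [if_pos hrows, if_pos hrows]
    · rw [if_neg hrows, if_neg hrows]
      by_cases hsq : (a.getD 0 []).length = a.length
      · rw [if_neg (not_not_intro hsq), if_neg (not_not_intro hsq)]
        have hlen : ∀ row ∈ a, row.length = a.length := by
          intro row hm
          by_contra hh
          apply hrows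
          simp only [List.any_eq_true, decide_eq_true_eq]
          exact ⟨row, hm, fun e => hh (e.trans hsq)⟩
        rw [numList_gen a a.length hlen []]
        simpa using dup_check_eq a.flatten
      · rw [if_pos (by simpa using hsq), if_pos (by simpa using hsq)]

-- ===== VERDICT (by name: the statement is the Claim_ definition above) =====
theorem isGoodSquare_spec : Claim_equal_isGoodSquare := by
  intro a _
  unfold Spec_isGoodSquare
  exact isGoodSquare_eq_alt a
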